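-- pv_equiv track=rewrite | github.com/hanlyang0522/AlgoSelf | 백준/Silver/18353. 병사 배치하기/병사 배치하기.py | maxFp
-- ===== SOURCE A (Python) =====
-- from bisect import bisect, bisect_left
--
-- def maxFp(sldrs):
--     lis = [sldrs[0]]
--
--     for sld in sldrs[1:]:
--         # sld가 들어갈 위치 찾음, 같은 값이라면 왼쪽으로 들어감
--         idx = bisect_left(lis, sld)
--
--         if idx >= len(lis):
--             lis.append(sld)
--         else:
--             # idx보다 작은 값이 idx에 insert 돼야 정렬을 만족하기 때문에
--             # idx를 sld로 대체한다면 더 작은 값으로 대체됨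
--             lis[idx] = sld
--
--     return len(sldrs) - len(lis)
-- ===== SOURCE B (Python) =====
-- def maxFp(sldrs):
--     # O(n^2) DP: dp holds (value, length of longest strictly increasing run ending there)
--     dp = []
--     for x in sldrs:
--         best = 0
--         for v, l in dp:
--             if v < x and best < l:
--                 best = l
--         dp.append((x, best + 1))
--     return len(sldrs) - max(l for _, l in dp)
-- ===== Notes on version B (the rewrite author's own statement) =====
-- stated objective: alternative
-- what changed: Replaced the patience-sorting tails array with bisect_left by the classic O(n^2) DP that stores, for each element, the length of the longest strictly increasing subsequence ending there, and returns n minus the maximum of those lengths.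
-- outside the precondition, e.g. on maxFp([]): A raises IndexError, B raises ValueError
import Mathlib
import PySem

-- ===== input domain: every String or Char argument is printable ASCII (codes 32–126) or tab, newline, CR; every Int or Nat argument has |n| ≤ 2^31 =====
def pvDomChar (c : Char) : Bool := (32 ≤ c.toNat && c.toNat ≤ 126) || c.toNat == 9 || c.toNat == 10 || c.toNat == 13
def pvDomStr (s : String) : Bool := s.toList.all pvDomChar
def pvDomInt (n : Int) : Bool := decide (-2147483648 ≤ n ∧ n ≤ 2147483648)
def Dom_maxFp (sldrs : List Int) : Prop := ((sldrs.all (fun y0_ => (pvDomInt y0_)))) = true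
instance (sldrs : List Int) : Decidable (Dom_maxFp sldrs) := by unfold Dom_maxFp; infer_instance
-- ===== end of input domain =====

-- B replaces A's patience-sorting tails array (bisect_left) with the classic
-- O(n^2) DP over "LIS length ending at each element"; alternative algorithm, not faster.

-- ===== PORT A =====
-- bisect.bisect_left on a sorted list: first index whose element is ≥ x (= length if none)
def bisectLeft (l : List Int) (x : Int) : Nat := l.findIdx (fun a => decide (x ≤ a))

def aStep (lis : List Int) (sld : Int) : List Int :=
  let idx := bisectLeft lis sld
  if lis.length ≤ idx then lis ++ [sld] else lis.set idx sld

def maxFp (sldrs : List Int) : Int :=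
  match sldrs with
  | [] => 0  -- sldrs[0] raises IndexError in Python; excluded by Pre_maxFp
  | s0 :: rest =>
    ((s0 :: rest).length : Int) - ((rest.foldl aStep [s0]).length : Int)

-- ===== PORT B =====
def bBest (dp : List (Int × Int)) (x : Int) : Int :=
  dp.foldl (fun b p => if p.1 < x ∧ b < p.2 then p.2 else b) 0

def bStep (dp : List (Int × Int)) (x : Int) : List (Int × Int) :=
  dp ++ [(x, bBest dp x + 1)]

-- Python's max over the generator of second components (raises on empty; excluded by Pre_maxFp)
def bMax (dp : List (Int × Int)) : Int :=
  match dp with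
  | [] => 0
  | p :: rest => rest.foldl (fun m q => max m q.2) p.2

def maxFp_alt (sldrs : List Int) : Int :=
  ((sldrs.length : Int)) - bMax (sldrs.foldl bStep [])

-- ===== PRECONDITION & SPEC =====
-- A raises IndexError (sldrs[0]) on the empty list, and B's max() raises there too.
def Pre_maxFp (sldrs : List Int) : Prop := sldrs ≠ []
instance (sldrs : List Int) : Decidable (Pre_maxFp sldrs) := by unfold Pre_maxFp; infer_instance
def pvWitness_maxFp : List Int := [3, 1, 2]

def Spec_maxFp (sldrs : List Int) (out : Int) : Prop := out = maxFp_alt sldrs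
instance (sldrs : List Int) (out : Int) : Decidable (Spec_maxFp sldrs out) := by unfold Spec_maxFp; infer_instance

-- ===== CLAIM (what is proved, stated in full; the proofs are below) =====
def Claim_equal_maxFp : Prop := ∀ (sldrs : List Int), Dom_maxFp sldrs → Pre_maxFp sldrs → Spec_maxFp sldrs (maxFp sldrs)

-- ===== LEMMAS AND PROOFS =====

-- The joint invariant: lis is A's sorted tails array, dp is B's (value, best-length) list.
-- lis[k] is the minimal tail of level k+1, attained by a dp entry, and every dp entry's
-- level is realised in lis with lis-value ≤ its value.
def InvAB (dp : List (Int × Int)) (lis : List Int) : Prop :=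
  lis.Pairwise (· < ·) ∧
  (∀ k : Nat, ∀ hk : k < lis.length, (lis[k], (k : Int) + 1) ∈ dp) ∧
  (∀ p ∈ dp, ∃ k : Nat, ∃ hk : k < lis.length, p.2 = (k : Int) + 1 ∧ lis[k] ≤ p.1)

-- generic foldl facts for bBest's fold
theorem bfold_le (x c : Int) (dp : List (Int × Int)) (b : Int) (hb : b ≤ c)
    (h : ∀ p ∈ dp, p.1 < x → p.2 ≤ c) :
    dp.foldl (fun b p => if p.1 < x ∧ b < p.2 then p.2 else b) b ≤ c := by
  induction dp generalizing b with
  | nil => simpa using hb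
  | cons a t ih =>
    simp only [List.foldl_cons]
    apply ih
    · split_ifs with hc
      · exact h a (by simp) hc.1
      · exact hb
    · intro p hp hpx; exact h p (by simp [hp]) hpx

theorem bfold_init_le (x : Int) (dp : List (Int × Int)) (b : Int) :
    b ≤ dp.foldl (fun b p => if p.1 < x ∧ b < p.2 then p.2 else b) b := by
  induction dp generalizing b with
  | nil => simp
  | cons a t ih =>
    simp only [List.foldl_cons]
    refine le_trans ?_ (ih _)
    split_ifs with hc
    · exact le_of_lt hc.2
    · exact le_refl b

theorem bfold_mem_le (x : Int) (dp : List (Int × Int)) (b : Int) (p : Int × Int)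
    (hp : p ∈ dp) (hpx : p.1 < x) :
    p.2 ≤ dp.foldl (fun b p => if p.1 < x ∧ b < p.2 then p.2 else b) b := by
  induction dp generalizing b with
  | nil => simp at hp
  | cons a t ih =>
    simp only [List.foldl_cons]
    rcases List.mem_cons.mp hp with h | h
    · subst h
      refine le_trans ?_ (bfold_init_le x t _)
      split_ifs with hc
      · exact le_refl _
      · rcases not_and_or.mp hc with h | h
        · exact absurd hpx h
        · omega
    · exact ih _ h

-- generic foldl facts for bMax's fold
theorem mfold_le (c : Int) (l : List (Int × Int)) (b : Int) (hb : b ≤ c)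
    (h : ∀ q ∈ l, q.2 ≤ c) : l.foldl (fun m q => max m q.2) b ≤ c := by
  induction l generalizing b with
  | nil => simpa using hb
  | cons a t ih =>
    simp only [List.foldl_cons]
    exact ih _ (max_le hb (h a (by simp))) (fun q hq => h q (by simp [hq]))

theorem mfold_init_le (l : List (Int × Int)) (b : Int) :
    b ≤ l.foldl (fun m q => max m q.2) b := by
  induction l generalizing b with
  | nil => simp
  | cons a t ih => exact le_trans (le_max_left _ _) (ih (max b a.2))

theorem mfold_mem_le (l : List (Int × Int)) (b : Int) (q : Int × Int) (hq : q ∈ l) :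
    q.2 ≤ l.foldl (fun m q => max m q.2) b := by
  induction l generalizing b with
  | nil => simp at hq
  | cons a t ih =>
    simp only [List.foldl_cons]
    rcases List.mem_cons.mp hq with h | h
    · subst h; exact le_trans (le_max_right _ _) (mfold_init_le t _)
    · exact ih _ h

-- bisect facts
theorem bisectLeft_le_length (l : List Int) (x : Int) : bisectLeft l x ≤ l.length :=
  List.findIdx_le_length

theorem bisectLeft_lt (l : List Int) (x : Int) (k : Nat) (hk : k < l.length)
    (h : k < bisectLeft l x) : l[k] < x := by
  have := List.not_of_lt_findIdx h
  simp at this; omega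

theorem bisectLeft_ge (l : List Int) (x : Int) (h : bisectLeft l x < l.length) :
    x ≤ l[bisectLeft l x]'h := by
  have := List.findIdx_getElem (p := fun a => decide (x ≤ a)) (xs := l) (w := h)
  simpa using this

theorem pairwise_getElem_lt (l : List Int) (hs : l.Pairwise (· < ·)) (i j : Nat)
    (hij : i < j) (hj : j < l.length) : l[i]'(by omega) < l[j] :=
  List.pairwise_iff_getElem.mp hs i j (by omega) hj hij

-- With the invariant, B's inner fold computes exactly A's bisect index.
theorem bBest_eq_idx (dp : List (Int × Int)) (lis : List Int) (x : Int)
    (hI : InvAB dp lis) : bBest dp x = (bisectLeft lis x : Int) := by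
  obtain ⟨hs, hex, hub⟩ := hI
  set idx := bisectLeft lis x with hidx
  have hle : idx ≤ lis.length := bisectLeft_le_length lis x
  apply le_antisymm
  · apply bfold_le
    · positivity
    · intro p hp hpx
      obtain ⟨k, hk, hlev, hval⟩ := hub p hp
      have hki : k < idx := by
        by_contra hge
        have hil : idx < lis.length := by omega
        have h1 : x ≤ lis[idx]'hil := bisectLeft_ge lis x hil
        have h2 : lis[idx]'hil ≤ lis[k] := by
          rcases Nat.lt_or_ge idx k with h | h
          · exact le_of_lt (pairwise_getElem_lt lis hs idx k h hk)
          · have : idx = k := by omega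
            subst this; exact le_refl _
        have : lis[k] < x := lt_of_le_of_lt hval hpx
        omega
      rw [hlev]; exact_mod_cast hki
  · rcases Nat.eq_zero_or_pos idx with h0 | hpos
    · rw [h0]; simpa using bfold_init_le x dp 0
    · have hm : idx - 1 < lis.length := by omega
      have hmem := hex (idx - 1) hm
      have hlt : lis[idx - 1]'hm < x := bisectLeft_lt lis x (idx - 1) hm (by omega)
      have := bfold_mem_le x dp 0 _ hmem hlt
      unfold bBest
      have : ((idx : Int) - 1) + 1 ≤ bBest dp x := by
        unfold bBest
        have hc : ((idx - 1 : Nat) : Int) = (idx : Int) - 1 := by omega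
        rw [← hc]; exact this
      omega

-- The invariant is preserved by one step of each program.
theorem inv_step (dp : List (Int × Int)) (lis : List Int) (x : Int)
    (hI : InvAB dp lis) : InvAB (bStep dp x) (aStep lis x) := by
  obtain ⟨hs, hex, hub⟩ := hI
  have hbb := bBest_eq_idx dp lis x ⟨hs, hex, hub⟩
  set idx := bisectLeft lis x with hidx
  have hle : idx ≤ lis.length := bisectLeft_le_length lis x
  have hbs : bStep dp x = dp ++ [(x, (idx : Int) + 1)] := by
    show dp ++ [(x, bBest dp x + 1)] = _
    rw [hbb]
  have has : aStep lis x = if lis.length ≤ idx then lis ++ [x] else lis.set idx x := rfl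
  rw [hbs, has]
  by_cases hcase : lis.length ≤ idx
  · -- append case: idx = lis.length
    have hidxL : idx = lis.length := by omega
    rw [if_pos hcase]
    refine ⟨?_, ?_, ?_⟩
    · rw [List.pairwise_append]
      refine ⟨hs, by simp, ?_⟩
      intro a ha y hy
      have hyx : y = x := by simpa using hy
      rw [hyx]
      obtain ⟨k, hk, hak⟩ := List.mem_iff_getElem.mp ha
      subst hak
      exact bisectLeft_lt lis x k hk (by omega)
    · intro k hk
      simp only [List.length_append, List.length_cons, List.length_nil] at hk
      rcases Nat.lt_or_ge k lis.length with h | h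
      · rw [List.getElem_append_left h]
        exact List.mem_append_left _ (hex k h)
      · have hkL : k = lis.length := by omega
        subst hkL
        have : (lis ++ [x])[lis.length]'(by simp) = x := by
          simp
        rw [this]
        apply List.mem_append_right
        simp [hidxL]
    · intro p hp
      rcases List.mem_append.mp hp with h | h
      · obtain ⟨k, hk, hlev, hval⟩ := hub p h
        exact ⟨k, by simp; omega, hlev, by rw [List.getElem_append_left hk]; exact hval⟩
      · simp at h
        subst h
        exact ⟨lis.length, by simp, by simp [hidxL], by simp⟩
  · -- set case: idx < lis.length
    replace hcase : idx < lis.length := by omega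
    rw [if_neg (by omega : ¬ lis.length ≤ idx)]
    have hLset : (lis.set idx x).length = lis.length := by simp
    have hget : ∀ (k : Nat) (hk : k < lis.length),
        (lis.set idx x)[k]'(by simpa using hk) = if k = idx then x else lis[k] := by
      intro k hk
      rw [List.getElem_set]
      rcases eq_or_ne k idx with h | h
      · subst h; simp
      · rw [if_neg (by omega), if_neg h]
    have hxle : x ≤ lis[idx]'hcase := bisectLeft_ge lis x hcase
    refine ⟨?_, ?_, ?_⟩
    · rw [List.pairwise_iff_getElem]
      intro i j hi hj hij
      rw [hLset] at hi hj
      rw [hget i (by omega), hget j hj]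
      rcases eq_or_ne i idx with h | h
      · subst h
        have hj' : j ≠ idx := by omega
        simp only [if_neg hj']
        exact lt_of_le_of_lt hxle (pairwise_getElem_lt lis hs idx j hij hj)
      · rcases eq_or_ne j idx with h2 | h2
        · subst h2
          simp only [if_neg h, if_pos]
          exact bisectLeft_lt lis x i (by omega) (by omega)
        · simp only [if_neg h, if_neg h2]
          exact pairwise_getElem_lt lis hs i j hij hj
    · intro k hk
      rw [hLset] at hk
      rcases eq_or_ne k idx with h | h
      · subst h
        rw [hget idx hcase]
        simp only [if_pos]
        apply List.mem_append_right; simp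
      · rw [hget k hk]
        simp only [if_neg h]
        exact List.mem_append_left _ (hex k hk)
    · intro p hp
      rcases List.mem_append.mp hp with h | h
      · obtain ⟨k, hk, hlev, hval⟩ := hub p h
        refine ⟨k, by omega, hlev, ?_⟩
        rw [hget k hk]
        rcases eq_or_ne k idx with he | he
        · subst he; simp only [if_pos]
          exact le_trans hxle hval
        · simp only [if_neg he]; exact hval
      · simp at h
        subst h
        refine ⟨idx, by omega, by simp, ?_⟩
        rw [hget idx hcase]; simp

theorem inv_fold (xs : List Int) (dp : List (Int × Int)) (lis : List Int)
    (hI : InvAB dp lis) : InvAB (xs.foldl bStep dp) (xs.foldl aStep lis) := by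
  induction xs generalizing dp lis with
  | nil => simpa using hI
  | cons a t ih => exact ih _ _ (inv_step dp lis a hI)

theorem aStep_ne_nil (lis : List Int) (x : Int) (h : lis ≠ []) : aStep lis x ≠ [] := by
  have ha : aStep lis x = if lis.length ≤ bisectLeft lis x then lis ++ [x]
      else lis.set (bisectLeft lis x) x := rfl
  rw [ha]
  split_ifs
  · simp
  · simpa using h

theorem fold_aStep_ne_nil (xs : List Int) (lis : List Int) (h : lis ≠ []) :
    xs.foldl aStep lis ≠ [] := by
  induction xs generalizing lis with
  | nil => simpa using h
  | cons a t ih => exact ih _ (aStep_ne_nil lis a h)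

theorem bMax_eq_length (dp : List (Int × Int)) (lis : List Int)
    (hI : InvAB dp lis) (hne : lis ≠ []) : bMax dp = (lis.length : Int) := by
  obtain ⟨hs, hex, hub⟩ := hI
  have hL : 0 < lis.length := List.length_pos_iff.mpr hne
  have hwit := hex (lis.length - 1) (by omega)
  have hwitlev : ((lis.length - 1 : Nat) : Int) + 1 = (lis.length : Int) := by omega
  match hdp : dp with
  | [] => simp at hwit
  | p :: rest =>
    unfold bMax
    apply le_antisymm
    · apply mfold_le
      · obtain ⟨k, hk, hlev, _⟩ := hub p (by simp)
        rw [hlev]; omega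
      · intro q hq
        obtain ⟨k, hk, hlev, _⟩ := hub q (by simp [hq])
        rw [hlev]; omega
    · rcases List.mem_cons.mp hwit with h | h
      · have : p.2 = (lis.length : Int) := by rw [← h]; exact hwitlev
        rw [← this]; exact mfold_init_le rest p.2
      · have := mfold_mem_le rest p.2 _ h
        simpa [hwitlev] using this

theorem inv_init (s0 : Int) : InvAB [(s0, 1)] [s0] := by
  refine ⟨by simp, ?_, ?_⟩
  · intro k hk
    simp at hk
    subst hk; simp
  · intro p hp
    simp at hp
    exact ⟨0, by simp, by simp [hp], by simp [hp]⟩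

-- ===== VERDICT (by name: the statement is the Claim_ definition above) =====
theorem maxFp_spec : Claim_equal_maxFp := by
  intro sldrs _ hpre
  unfold Spec_maxFp maxFp maxFp_alt
  match sldrs with
  | [] => exact absurd rfl hpre
  | s0 :: rest =>
    have hstep0 : bStep [] s0 = [(s0, 1)] := by simp [bStep, bBest]
    have hfold : (s0 :: rest).foldl bStep [] = rest.foldl bStep [(s0, 1)] := by
      simp [List.foldl_cons, hstep0]
    rw [hfold]
    have hI := inv_fold rest [(s0, 1)] [s0] (inv_init s0)
    have hne := fold_aStep_ne_nil rest [s0] (by simp)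
    rw [bMax_eq_length _ _ hI hne]
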